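-- pv_equiv track=rewrite | github.com/zckr08/Proyecto-0-Codificaci-n | main().py | codificarProblema5
-- ===== SOURCE A (Python) =====
-- def codificarProblema5(texto):
--     textoCodificado = ""
--     if len(texto) % 4 != 0:
--         texto = texto+" "*(4-(len(texto)%4))
--     texto = texto.replace(" ", "-")
--     texto = list(texto)
--     for caracter in texto[0::4]:
--         textoCodificado = textoCodificado+caracter
--     for caracter in texto[1::2]:
--         textoCodificado = textoCodificado+caracter
--     for caracter in texto[2::4]:
--         textoCodificado = textoCodificado+caracter
--     docker1 = list(textoCodificado)
--     docker2 = []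
--     while docker1 != []:
--         for i in range(0,5):
--             if docker1 != []:
--                 docker2.append(docker1.pop(0))
--         if docker1 != []:
--             docker2.append(" ")
--     textoCodificado = ""
--     for i in docker2:
--         textoCodificado = textoCodificado+i
--     return textoCodificado
-- ===== SOURCE B (Python) =====
-- def codificarProblema5(texto):
--     if len(texto) % 4 != 0:
--         texto += " " * (4 - len(texto) % 4)
--     s = texto.replace(" ", "-")
--     n = len(s)
--     order = list(range(0, n, 4)) + list(range(1, n, 2)) + list(range(2, n, 4))
--     out = []
--     for k, i in enumerate(order):
--         if k and k % 5 == 0: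
--             out.append(" ")
--         out.append(s[i])
--     return "".join(out)
-- ===== Notes on version B (the rewrite author's own statement) =====
-- stated objective: faster
-- what changed: B replaces A's three separate slice-reorder loops plus the destructive pop(0)-based 5-chunking while-loop with a single pass over an explicit permutation index list, inserting the space separator from a position counter.
import Mathlib
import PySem

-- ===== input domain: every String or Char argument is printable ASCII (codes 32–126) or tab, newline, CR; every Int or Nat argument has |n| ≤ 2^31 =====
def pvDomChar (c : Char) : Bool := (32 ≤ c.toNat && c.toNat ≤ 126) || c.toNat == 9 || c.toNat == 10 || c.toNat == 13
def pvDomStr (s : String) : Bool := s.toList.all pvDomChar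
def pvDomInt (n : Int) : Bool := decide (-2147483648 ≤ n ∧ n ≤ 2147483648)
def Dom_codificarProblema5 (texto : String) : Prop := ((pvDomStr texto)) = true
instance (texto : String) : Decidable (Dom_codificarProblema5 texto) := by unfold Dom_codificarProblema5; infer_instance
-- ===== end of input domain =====

-- B fuses A's three reorder loops and its pop(0)-based 5-chunking loop into one index-driven
-- pass over an explicit permutation list with a position counter (objective: faster, measured).

-- ===== PORT A =====

-- inner 'for i in range(0,5): if docker1 != []: docker2.append(docker1.pop(0))' body
def popLoop (st : List Char × List Char) (_ : Int) : List Char × List Char :=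
  match st with
  | ([], d2) => ([], d2)
  | (c :: d1, d2) => (d1, d2 ++ [c])

-- needed by chunkLoop's termination proof (cited in decreasing_by)
theorem popLoop_foldl (l : List Int) : ∀ (d1 d2 : List Char),
    l.foldl popLoop (d1, d2) = (d1.drop l.length, d2 ++ d1.take l.length) := by
  induction l with
  | nil => simp
  | cons x xs ih =>
    intro d1 d2
    cases d1 with
    | nil => simp [popLoop, ih]
    | cons c d1 => simp [popLoop, ih]

-- the 'while docker1 != []' loop of A
def chunkLoop (d1 d2 : List Char) : List Char :=
  if h : d1 = [] then d2
  else
    let st := (PySem.List.pyRange 0 5 1).foldl popLoop (d1, d2)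
    if st.1 ≠ [] then chunkLoop st.1 (st.2 ++ [' ']) else chunkLoop st.1 st.2
termination_by d1.length
decreasing_by
  all_goals
    simp only [popLoop_foldl] at *
    have : d1 ≠ [] := h
    cases d1 <;> simp_all <;> omega

def codificarProblema5 (texto : String) : String :=
  let l0 := texto.toList
  let l1 := if l0.length % 4 ≠ 0 then l0 ++ List.replicate (4 - l0.length % 4) ' ' else l0
  let s := PySem.Chars.replace l1 [' '] ['-']
  let tc := ((PySem.List.slice? s (some 0) none 4).getD []).foldl (fun acc c => acc ++ [c]) []
  let tc := ((PySem.List.slice? s (some 1) none 2).getD []).foldl (fun acc c => acc ++ [c]) tc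
  let tc := ((PySem.List.slice? s (some 2) none 4).getD []).foldl (fun acc c => acc ++ [c]) tc
  let docker2 := chunkLoop tc []
  -- final 'for i in docker2: textoCodificado += i'
  String.ofList (docker2.foldl (fun acc c => acc ++ [c]) [])

-- ===== PORT B =====
def codificarProblema5_alt (texto : String) : String :=
  let l0 := texto.toList
  let l1 := if l0.length % 4 ≠ 0 then l0 ++ List.replicate (4 - l0.length % 4) ' ' else l0
  let s := PySem.Chars.replace l1 [' '] ['-']
  let n : Int := s.length
  let order := PySem.List.pyRange 0 n 4 ++ PySem.List.pyRange 1 n 2 ++ PySem.List.pyRange 2 n 4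
  -- 'for k, i in enumerate(order): if k and k % 5 == 0: out.append(" "); out.append(s[i])'
  let out := (PySem.List.enumerate order 0).foldl
    (fun acc ki =>
      (if ki.1 ≠ 0 ∧ PySem.Int.mod ki.1 5 = 0 then acc ++ [' '] else acc) ++
        [PySem.List.pyGetD s ki.2 ' ']) []
  String.ofList out  -- ''.join over single-char strings

-- ===== PRECONDITION & SPEC =====
def Spec_codificarProblema5 (texto : String) (out : String) : Prop := out = codificarProblema5_alt texto
instance (texto : String) (out : String) : Decidable (Spec_codificarProblema5 texto out) := by unfold Spec_codificarProblema5; infer_instance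

-- ===== CLAIM (what is proved, stated in full; the proofs are below) =====
def Claim_equal_codificarProblema5 : Prop := ∀ (texto : String), Dom_codificarProblema5 texto → Spec_codificarProblema5 texto (codificarProblema5 texto)

-- ===== LEMMAS AND PROOFS =====

-- reference shape: chunks of 5 separated by spaces
def spaced (t : List Char) : List Char :=
  if t = [] then []
  else t.take 5 ++ (if t.drop 5 = [] then [] else ' ' :: spaced (t.drop 5))
termination_by t.length
decreasing_by
  rename_i h1 h2
  have := List.length_pos_iff.mpr (fun hh : t.drop 5 = [] => h2 hh)
  simp at this ⊢
  omega

-- B's space-insertion, position-indexed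
def ins (t : List Char) (c : Nat) : List Char :=
  match t with
  | [] => []
  | x :: xs => (if c ≠ 0 ∧ c % 5 = 0 then [' '] else []) ++ x :: ins xs (c + 1)

theorem chunkLoop_eq_spaced (n : Nat) : ∀ (d1 d2 : List Char), d1.length ≤ n →
    chunkLoop d1 d2 = d2 ++ spaced d1 := by
  induction n with
  | zero =>
    intro d1 d2 h
    have : d1 = [] := by cases d1 <;> simp_all
    subst this; rw [chunkLoop, spaced]; simp
  | succ n ih =>
    intro d1 d2 h
    by_cases hd : d1 = []
    · subst hd; rw [chunkLoop, spaced]; simp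
    · rw [chunkLoop, spaced]
      simp only [hd, dite_false, popLoop_foldl]
      have hlen : (PySem.List.pyRange 0 5 1).length = 5 := by decide
      rw [hlen]
      by_cases hdrop : d1.drop 5 = []
      · simp [hdrop, chunkLoop]
      · simp only [hdrop, ne_eq, not_false_eq_true, if_true]
        rw [ih (d1.drop 5) _ (by have := List.length_pos_iff.mpr hdrop; simp at this ⊢; omega)]
        simp

theorem ins_chunk (n : Nat) : ∀ (t : List Char) (c : Nat), t.length ≤ n → c % 5 = 0 →
    ins t c = (if c ≠ 0 ∧ t ≠ [] then [' '] else []) ++ spaced t := by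
  induction n using Nat.strong_induction_on with
  | _ n ih =>
    intro t c hlen hc
    have H1 : (c + 1) % 5 ≠ 0 := by omega
    have H2 : (c + 2) % 5 ≠ 0 := by omega
    have H3 : (c + 3) % 5 ≠ 0 := by omega
    have H4 : (c + 4) % 5 ≠ 0 := by omega
    rcases t with _ | ⟨x, _ | ⟨x1, _ | ⟨x2, _ | ⟨x3, _ | ⟨x4, xs⟩⟩⟩⟩⟩
    · simp [ins, spaced]
    · rw [spaced]; simp [ins, hc]
    · rw [spaced]; simp [ins, hc, H1]
    · rw [spaced]; simp [ins, hc, H1, H2]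
    · rw [spaced]; simp [ins, hc, H1, H2, H3]
    · have H5 : (c + 5) % 5 = 0 := by omega
      have hn : n ≠ 0 := by simp at hlen; omega
      simp only [ins]
      rw [spaced]
      rw [ih (n - 1) (by omega) xs (c + 5) (by simp at hlen; omega) H5]
      have hdrop : List.drop 5 (x :: x1 :: x2 :: x3 :: x4 :: xs) = xs := rfl
      have htake : List.take 5 (x :: x1 :: x2 :: x3 :: x4 :: xs) = [x, x1, x2, x3, x4] := rfl
      by_cases hxs : xs = []
      · subst hxs; simp [hc, H1, H2, H3, H4, spaced]
      · simp [hc, H1, H2, H3, H4, hxs, hdrop, htake]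

-- single-char replace is a map
theorem replace_go_single (fuel : Nat) : ∀ (l acc : List Char), l.length ≤ fuel →
    PySem.Chars.replace.go [' '] ['-'] fuel l acc
      = acc.reverse ++ l.map (fun c => if c = ' ' then '-' else c) := by
  induction fuel with
  | zero =>
    intro l acc h
    have : l = [] := by cases l <;> simp_all
    subst this; simp [PySem.Chars.replace.go]
  | succ fuel ih =>
    intro l acc h
    cases l with
    | nil => simp [PySem.Chars.replace.go]
    | cons c t =>
      simp only [PySem.Chars.replace.go]
      by_cases hc : c = ' '
      · subst hc
        simp only [List.isPrefixOf, BEq.rfl, Bool.true_and, if_pos]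
        have hd : List.drop [' '].length (' ' :: t) = t := rfl
        rw [hd, ih t _ (by simp at h ⊢; omega)]
        simp
      · have : [' '].isPrefixOf (c :: t) = false := by
          simp [List.isPrefixOf]; exact fun hh => hc (by simpa using hh.symm)
        rw [if_neg (by simp [this])]
        rw [ih t _ (by simp at h ⊢; omega)]
        simp [hc]

theorem replace_single (l : List Char) :
    PySem.Chars.replace l [' '] ['-'] = l.map (fun c => if c = ' ' then '-' else c) := by
  rw [PySem.Chars.replace]
  simp only [List.isEmpty]
  exact replace_go_single l.length l [] le_rfl

-- a [a :: n : st] slice as a gather over range(a, n, st)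
theorem slice_step_eq (s : List Char) (a st : Int) (hst : 0 < st)
    (h0 : 0 ≤ a) (ha : a ≤ s.length) (d : Char) :
    (PySem.List.slice? s (some a) none st).getD []
      = (PySem.List.pyRange a (s.length : Int) st).map (fun i => PySem.List.pyGetD s i d) := by
  rw [PySem.List.slice?, if_neg (by omega : ¬ st = 0)]
  simp only [PySem.List.sliceIndices]
  rw [if_neg (by omega : ¬ st < 0), if_neg (by omega : ¬ st < 0), if_neg (by omega : ¬ a < 0)]
  simp only [if_neg (by omega : ¬ st < 0)]
  rw [min_eq_left ha, if_pos hst]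
  rw [PySem.List.pyRange_of_pos _ _ hst, List.map_map]
  rw [Option.getD_some]
  apply List.filterMap_eq_map_iff_forall_eq_some.mpr
  intro k hk
  rw [List.mem_range] at hk
  have hlt : a < (s.length : Int) := by
    by_contra hge
    rw [if_neg hge] at hk
    omega
  rw [if_pos hlt] at hk
  have hk' : (k : Int) + 1 ≤ (↑s.length - a + st - 1) / st := by
    have := Int.lt_toNat.mp hk
    omega
  have hmul : ((k : Int) + 1) * st ≤ ↑s.length - a + st - 1 :=
    (Int.le_ediv_iff_mul_le hst).mp hk'
  have hidx0 : 0 ≤ a + st * (k : Int) := by positivity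
  have hidx : a + st * (k : Int) < (s.length : Int) := by nlinarith
  have hnat : (a + st * (k : Int)).toNat < s.length := by omega
  rw [List.getElem?_eq_getElem hnat]
  simp only [Function.comp]
  rw [PySem.List.pyGetD_eq_getElem s d hidx0 (by simpa using hidx)]

-- B's enumerate fold produces ins of the gathered list
theorem foldB (s : List Char) (l : List Int) : ∀ (c : Nat) (acc : List Char),
    (PySem.List.enumerate l (c : Int)).foldl
      (fun acc ki =>
        (if ki.1 ≠ 0 ∧ PySem.Int.mod ki.1 5 = 0 then acc ++ [' '] else acc) ++
          [PySem.List.pyGetD s ki.2 ' ']) acc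
    = acc ++ ins (l.map (fun i => PySem.List.pyGetD s i ' ')) c := by
  induction l with
  | nil => intro c acc; simp [PySem.List.enumerate, ins]
  | cons i l ih =>
    intro c acc
    rw [PySem.List.enumerate_cons]
    simp only [List.foldl_cons, List.map_cons, ins]
    have : ((c : Int) + 1) = ((c + 1 : Nat) : Int) := by push_cast; ring
    rw [this, ih]
    have hmod : PySem.Int.mod (c : Int) 5 = ((c % 5 : Nat) : Int) := by
      exact_mod_cast PySem.Int.mod_natCast c 5
    by_cases hc : c ≠ 0 ∧ c % 5 = 0
    · rw [if_pos, if_pos hc] <;> simp_all <;> omega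
    · rw [if_neg, if_neg hc]
      · simp
      · rw [hmod]; push_cast; omega

theorem chunkLoop_spaced (d1 : List Char) : chunkLoop d1 [] = spaced d1 := by
  simpa using chunkLoop_eq_spaced d1.length d1 [] le_rfl

theorem ins_zero (t : List Char) : ins t 0 = spaced t := by
  simpa using ins_chunk t.length t 0 le_rfl rfl

theorem foldB0 (s : List Char) (l : List Int) :
    (PySem.List.enumerate l 0).foldl
      (fun acc ki =>
        (if ki.1 ≠ 0 ∧ PySem.Int.mod ki.1 5 = 0 then acc ++ [' '] else acc) ++
          [PySem.List.pyGetD s ki.2 ' ']) []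
    = ins (l.map (fun i => PySem.List.pyGetD s i ' ')) 0 := by
  simpa using foldB s l 0 []

-- ===== VERDICT (by name: the statement is the Claim_ definition above) =====
theorem codificarProblema5_spec : Claim_equal_codificarProblema5 := by
  intro texto _
  unfold Spec_codificarProblema5
  simp only [codificarProblema5, codificarProblema5_alt, replace_single]
  generalize texto.toList = l0
  by_cases h0 : l0 = []
  · subst h0
    have e0 : ((PySem.List.slice? ([] : List Char) (some 0) none 4).getD []) = ([] : List Char) := rfl
    have e1 : ((PySem.List.slice? ([] : List Char) (some 1) none 2).getD []) = ([] : List Char) := rfl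
    have e2 : ((PySem.List.slice? ([] : List Char) (some 2) none 4).getD []) = ([] : List Char) := rfl
    have er0 : PySem.List.pyRange 0 (0 : Int) 4 = [] := rfl
    have er1 : PySem.List.pyRange 1 (0 : Int) 2 = [] := rfl
    have er2 : PySem.List.pyRange 2 (0 : Int) 4 = [] := rfl
    have hcl : chunkLoop [] [] = [] := by rw [chunkLoop]; simp
    simp [e0, e1, e2, er0, er1, er2, hcl]
  · set l1 := (if l0.length % 4 ≠ 0 then l0 ++ List.replicate (4 - l0.length % 4) ' ' else l0)
      with hl1
    set s := l1.map (fun c => if c = ' ' then '-' else c) with hs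
    have hlen : 4 ≤ s.length := by
      rw [hs, List.length_map, hl1]
      have : 1 ≤ l0.length := List.length_pos_iff.mpr h0
      split <;> simp <;> omega
    rw [slice_step_eq s 0 4 (by norm_num) (by norm_num) (by push_cast; omega) ' ',
        slice_step_eq s 1 2 (by norm_num) (by norm_num) (by push_cast; omega) ' ',
        slice_step_eq s 2 4 (by norm_num) (by norm_num) (by push_cast; omega) ' ']
    simp only [PySem.List.foldl_append_singleton_eq_self, List.nil_append]
    rw [chunkLoop_spaced, foldB0, ins_zero]
    rw [List.map_append, List.map_append]
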